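-- pv_equiv track=rewrite | github.com/Tatsu-Archive/python-lab-cycle | Python - Lab Cycle 1/Question - 1/code.py | sum_places
-- ===== SOURCE A (Python) =====
-- def sum_places(num): #function to find the difference b/w the oddplace num and evenplace num
--     prododd = 1
--     prodeven = 1
--     pos = 1 #variable for keeping track of the position
--     while num != 0:
--         if pos % 2 == 0: #if position is even, it gets mulitplied to even prod variable
--             prodeven *= num % 10
--         else:
--             prododd *= num % 10 #if position is odd, it gets mulitplied to odd prod variable
--         num = num//10
--         pos += 1 #updating the position
--     return prododd-prodeven #returning the subtracted value
-- ===== SOURCE B (Python) =====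
-- def sum_places(num):
--     # Recursive from the most-significant digit side: rec(n) returns
--     # (product of odd-place digits, product of even-place digits) of n.
--     # Stripping the last digit shifts every remaining place's parity, so
--     # the pair from rec(n // 10) comes back with its roles swapped.
--     def rec(n):
--         if n == 0:
--             return (1, 1)
--         po, pe = rec(n // 10)
--         return ((n % 10) * pe, po)
--     po, pe = rec(num)
--     return po - pe
-- ===== Notes on version B (the rewrite author's own statement) =====
-- stated objective: alternative
-- what changed: Replaces the while loop with its position counter and two running products by a parity-swapping recursion over n//10 that returns the (odd-place, even-place) product pair directly.
import Mathlib
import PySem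

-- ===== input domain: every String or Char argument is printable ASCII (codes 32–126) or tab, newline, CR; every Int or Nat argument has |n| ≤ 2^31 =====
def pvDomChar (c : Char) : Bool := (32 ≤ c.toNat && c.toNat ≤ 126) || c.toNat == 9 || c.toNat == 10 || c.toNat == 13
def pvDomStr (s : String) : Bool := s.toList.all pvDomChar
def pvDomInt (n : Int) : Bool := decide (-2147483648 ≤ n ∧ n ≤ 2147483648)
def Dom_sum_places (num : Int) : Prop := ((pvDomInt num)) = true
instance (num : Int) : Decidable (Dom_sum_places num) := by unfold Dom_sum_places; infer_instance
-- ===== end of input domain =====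

-- B differs from A by structure only: a parity-swapping recursion over n // 10 returning the
-- (odd-place product, even-place product) pair, instead of A's while loop with a position counter.

-- ===== PORT A =====
-- fuel makes the while loop total in Lean; for 0 ≤ num (Pre_) the fuel num.toNat+1 is never exhausted,
-- so the loop is exactly A's (A diverges on negative num, excluded by Pre_).
def sumPlacesLoop : Nat → Int → Int → Int → Int → Int
  | 0, _, prododd, prodeven, _ => prododd - prodeven
  | f+1, num, prododd, prodeven, pos =>
    if num ≠ 0 then
      if PySem.Int.mod pos 2 = 0 then
        sumPlacesLoop f (PySem.Int.floordiv num 10) prododd (prodeven * PySem.Int.mod num 10) (pos+1)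
      else
        sumPlacesLoop f (PySem.Int.floordiv num 10) (prododd * PySem.Int.mod num 10) prodeven (pos+1)
    else prododd - prodeven

def sum_places (num : Int) : Int := sumPlacesLoop (num.toNat + 1) num 1 1 1

-- ===== PORT B =====
-- rec(n) of Source B: fuel for the same reason (Source B's recursion only terminates for 0 ≤ n, inside Pre_).
def sumPlacesRec : Nat → Int → Int × Int
  | 0, _ => (1, 1)
  | f+1, n =>
    if n = 0 then (1, 1)
    else
      let p := sumPlacesRec f (PySem.Int.floordiv n 10)
      ((PySem.Int.mod n 10) * p.2, p.1)

def sum_places_alt (num : Int) : Int :=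
  let p := sumPlacesRec (num.toNat + 1) num
  p.1 - p.2

-- ===== PRECONDITION & SPEC =====
-- Pre_ excludes negative num: there A's while loop never terminates (floor division by ten
-- keeps a negative num negative, so it never reaches zero) and B's recursion likewise does not return.
def Pre_sum_places (num : Int) : Prop := 0 ≤ num
instance (num : Int) : Decidable (Pre_sum_places num) := by unfold Pre_sum_places; infer_instance
def pvWitness_sum_places : Int := 123

def Spec_sum_places (num : Int) (out : Int) : Prop := out = sum_places_alt num
instance (num : Int) (out : Int) : Decidable (Spec_sum_places num out) := by unfold Spec_sum_places; infer_instance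

-- ===== CLAIM (what is proved, stated in full; the proofs are below) =====
def Claim_equal_sum_places : Prop := ∀ (num : Int), Dom_sum_places num → Pre_sum_places num → Spec_sum_places num (sum_places num)

-- ===== LEMMAS AND PROOFS =====

lemma sumPlacesRec_fuel : ∀ (f g : Nat) (n : Int), 0 ≤ n → n.toNat < f → n.toNat < g →
    sumPlacesRec f n = sumPlacesRec g n := by
  intro f
  induction f with
  | zero => intro g n _ hf _; omega
  | succ f ih =>
    intro g n h0 hf hg
    match g, hg with
    | g+1, _ =>
      by_cases hn : n = 0
      · simp [sumPlacesRec, hn]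
      · have hpos : 0 < n := lt_of_le_of_ne h0 (Ne.symm hn)
        have hd : PySem.Int.floordiv n 10 = n / 10 :=
          PySem.Int.floordiv_eq_ediv_of_pos (by omega)
        have h0' : 0 ≤ n / 10 := Int.ediv_nonneg h0 (by omega)
        have hlt : (n / 10).toNat < n.toNat := by omega
        simp only [sumPlacesRec, hn, if_neg hn]
        rw [hd, ih g (n / 10) h0' (by omega) (by omega)]

lemma loop_eq_rec : ∀ (f : Nat) (n : Int), 0 ≤ n → n.toNat < f → ∀ (po pe pos : Int),
    sumPlacesLoop f n po pe pos =
      if PySem.Int.mod pos 2 = 0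
      then po * (sumPlacesRec (n.toNat + 1) n).2 - pe * (sumPlacesRec (n.toNat + 1) n).1
      else po * (sumPlacesRec (n.toNat + 1) n).1 - pe * (sumPlacesRec (n.toNat + 1) n).2 := by
  intro f
  induction f with
  | zero => intro n _ hf; omega
  | succ f ih =>
    intro n h0 hf po pe pos
    by_cases hn : n = 0
    · subst hn
      simp [sumPlacesLoop, sumPlacesRec]
    · have hpos : 0 < n := lt_of_le_of_ne h0 (Ne.symm hn)
      have hd : PySem.Int.floordiv n 10 = n / 10 :=
        PySem.Int.floordiv_eq_ediv_of_pos (by omega)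
      have h0' : 0 ≤ n / 10 := Int.ediv_nonneg h0 (by omega)
      have hlt : (n / 10).toNat < n.toNat := by omega
      -- unfold one step of sumPlacesRec at fuel n.toNat+1 and normalise its inner fuel
      have hrec : sumPlacesRec (n.toNat + 1) n =
          ((PySem.Int.mod n 10) * (sumPlacesRec ((n / 10).toNat + 1) (n / 10)).2,
           (sumPlacesRec ((n / 10).toNat + 1) (n / 10)).1) := by
        conv_lhs => rw [sumPlacesRec]
        rw [if_neg hn, hd]
        rw [sumPlacesRec_fuel n.toNat ((n / 10).toNat + 1) (n / 10) h0' (by omega) (by omega)]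
      have hm2 : PySem.Int.mod pos 2 = pos % 2 := PySem.Int.mod_eq_emod_of_pos (by omega)
      have hm2' : PySem.Int.mod (pos + 1) 2 = (pos + 1) % 2 := PySem.Int.mod_eq_emod_of_pos (by omega)
      by_cases hp : PySem.Int.mod pos 2 = 0
      · have hp' : ¬ PySem.Int.mod (pos + 1) 2 = 0 := by rw [hm2']; rw [hm2] at hp; omega
        simp only [sumPlacesLoop, hn, not_false_iff, if_true, if_pos hp, hd]
        rw [ih (n / 10) h0' (by omega), if_neg hp', hrec, if_pos hn]
        ring
      · have hp' : PySem.Int.mod (pos + 1) 2 = 0 := by rw [hm2']; rw [hm2] at hp; omega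
        simp only [sumPlacesLoop, hn, not_false_iff, if_true, if_neg hp, hd]
        rw [ih (n / 10) h0' (by omega), if_pos hp', hrec, if_pos hn]
        ring

-- ===== VERDICT (by name: the statement is the Claim_ definition above) =====
theorem sum_places_spec : Claim_equal_sum_places := by
  intro num _ hpre
  unfold Spec_sum_places sum_places sum_places_alt
  rw [loop_eq_rec (num.toNat + 1) num hpre (by omega)]
  have : PySem.Int.mod 1 2 = 1 % 2 := PySem.Int.mod_eq_emod_of_pos (by omega)
  rw [if_neg (by rw [this]; decide)]
  ring
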